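-- pv_equiv track=rewrite | github.com/mboyanov/propaganda-deteciton | utils.py | get_consecutive_spans
-- ===== SOURCE A (Python) =====
-- def get_consecutive_spans(arr):
--     span_len = 0
--     spans = []
--     for i, v in enumerate(arr):
--         if v > 0:
--             span_len += 1
--         elif span_len > 0:
--             spans.append((i - span_len, i))
--             span_len = 0
--     if span_len > 0:
--         spans.append((len(arr) - span_len, len(arr)))
--     return spans
-- ===== SOURCE B (Python) =====
-- from itertools import groupby
--
-- def get_consecutive_spans(arr):
--     spans = []
--     idx = 0
--     for key, group in groupby(arr, key=lambda x: x > 0):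
--         length = sum(1 for _ in group)
--         if key:
--             spans.append((idx, idx + length))
--         idx += length
--     return spans
-- ===== Notes on version B (the rewrite author's own statement) =====
-- stated objective: idiomatic
-- what changed: Replaces per-element span_len counter bookkeeping with itertools.groupby over the positivity predicate, iterating over runs and emitting one span per positive run.
import Mathlib
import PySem

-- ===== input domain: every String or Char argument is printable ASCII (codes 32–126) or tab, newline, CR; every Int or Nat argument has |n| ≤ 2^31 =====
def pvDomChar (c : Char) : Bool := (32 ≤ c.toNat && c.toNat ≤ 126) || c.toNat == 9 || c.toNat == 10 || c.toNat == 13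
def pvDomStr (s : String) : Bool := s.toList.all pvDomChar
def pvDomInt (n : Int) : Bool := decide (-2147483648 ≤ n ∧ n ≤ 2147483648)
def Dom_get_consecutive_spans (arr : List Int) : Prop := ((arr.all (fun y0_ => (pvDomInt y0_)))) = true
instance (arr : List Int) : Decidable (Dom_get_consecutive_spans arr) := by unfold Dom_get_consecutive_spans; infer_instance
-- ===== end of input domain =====

-- ===== PORT A =====
-- B re-implements A more idiomatically: itertools.groupby over the positivity predicate,
-- iterating over runs instead of per-element span_len counter bookkeeping. Return values proved equal.

-- A's loop body over enumerate(arr): state = (span_len, spans)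
def pvStepA (s : Int × List (Int × Int)) (p : Int × Int) : Int × List (Int × Int) :=
  if p.2 > 0 then (s.1 + 1, s.2)
  else if s.1 > 0 then (0, s.2 ++ [(p.1 - s.1, p.1)])
  else s

def get_consecutive_spans (arr : List Int) : List (Int × Int) :=
  let st := (PySem.List.enumerate arr).foldl pvStepA (0, [])
  if st.1 > 0 then st.2 ++ [((arr.length : Int) - st.1, (arr.length : Int))] else st.2

-- ===== PORT B =====
-- groupby(arr, key=lambda x: x > 0): one recursive step per maximal run of equal key
def pvGroups (idx : Int) (l : List Int) : List (Int × Int) :=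
  match l with
  | [] => []
  | x :: xs =>
    let k := decide (x > 0)
    let grp := (x :: xs).takeWhile (fun y => decide (y > 0) == k)
    let rest := (x :: xs).dropWhile (fun y => decide (y > 0) == k)
    let n : Int := grp.length
    (if k then [(idx, idx + n)] else []) ++ pvGroups (idx + n) rest
termination_by l.length
decreasing_by
  simp only [List.dropWhile_cons, BEq.rfl, if_pos]
  exact Nat.lt_succ_of_le (List.length_dropWhile_le _ _)

def get_consecutive_spans_alt (arr : List Int) : List (Int × Int) :=
  pvGroups 0 arr

-- ===== PRECONDITION & SPEC =====
def Spec_get_consecutive_spans (arr : List Int) (out : List (Int × Int)) : Prop := out = get_consecutive_spans_alt arr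
instance (arr : List Int) (out : List (Int × Int)) : Decidable (Spec_get_consecutive_spans arr out) := by unfold Spec_get_consecutive_spans; infer_instance

-- ===== CLAIM (what is proved, stated in full; the proofs are below) =====
def Claim_equal_get_consecutive_spans : Prop := ∀ (arr : List Int), Dom_get_consecutive_spans arr → Spec_get_consecutive_spans arr (get_consecutive_spans arr)

-- ===== LEMMAS AND PROOFS =====

-- pvGroups only looks at the positivity pattern of the list
theorem pvGroups_tw_len (k : Bool) (l₁ l₂ : List Int)
    (h : l₁.map (fun y => decide (y > 0)) = l₂.map (fun y => decide (y > 0))) :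
    (l₁.takeWhile (fun y => decide (y > 0) == k)).length
      = (l₂.takeWhile (fun y => decide (y > 0) == k)).length := by
  have := congrArg (fun t : List Bool => (t.takeWhile (fun b => b == k)).length) h
  simpa [List.takeWhile_map, Function.comp] using this

theorem pvGroups_dw_map (k : Bool) (l₁ l₂ : List Int)
    (h : l₁.map (fun y => decide (y > 0)) = l₂.map (fun y => decide (y > 0))) :
    (l₁.dropWhile (fun y => decide (y > 0) == k)).map (fun y => decide (y > 0))
      = (l₂.dropWhile (fun y => decide (y > 0) == k)).map (fun y => decide (y > 0)) := by
  have := congrArg (fun t : List Bool => t.dropWhile (fun b => b == k)) h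
  simpa [List.dropWhile_map, Function.comp] using this

theorem pvGroups_congr : ∀ (n : Nat) (l₁ l₂ : List Int) (idx : Int), l₁.length ≤ n →
    l₁.map (fun y => decide (y > 0)) = l₂.map (fun y => decide (y > 0)) →
    pvGroups idx l₁ = pvGroups idx l₂ := by
  intro n
  induction n with
  | zero =>
    intro l₁ l₂ idx hn h
    have h1 : l₁ = [] := List.eq_nil_of_length_eq_zero (Nat.le_zero.mp hn)
    subst h1
    have h2 : l₂ = [] := by
      have := congrArg List.length h
      simpa using (List.eq_nil_of_length_eq_zero (by simpa using this.symm))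
    subst h2; rfl
  | succ n ih =>
    intro l₁ l₂ idx hn h
    match l₁, l₂ with
    | [], [] => rfl
    | [], z :: zs => simp at h
    | x :: xs, [] => simp at h
    | x :: xs, z :: zs =>
      simp only [List.map_cons, List.cons.injEq] at h
      obtain ⟨hk, hm⟩ := h
      have hmap : (x :: xs).map (fun y => decide (y > 0)) = (z :: zs).map (fun y => decide (y > 0)) := by
        simp [hk, hm]
      rw [pvGroups.eq_def, pvGroups.eq_def]
      simp only
      have hlen := pvGroups_tw_len (decide (x > 0)) (x :: xs) (z :: zs) hmap
      have hdrop := pvGroups_dw_map (decide (x > 0)) (x :: xs) (z :: zs) hmap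
      have hdlen : ((x :: xs).dropWhile (fun y => decide (y > 0) == decide (x > 0))).length ≤ n := by
        have h1 : ((x :: xs).dropWhile (fun y => decide (y > 0) == decide (x > 0))).length
            = (xs.dropWhile (fun y => decide (y > 0) == decide (x > 0))).length := by
          simp
        rw [h1]
        have h2 := List.length_dropWhile_le (fun y => decide (y > 0) == decide (x > 0)) xs
        have hb : (x :: xs).length = xs.length + 1 := by simp
        omega
      rw [hk] at hlen hdrop hdlen ⊢
      rw [hlen, ih _ _ _ hdlen hdrop]

-- a non-positive head just advances the index
theorem pvGroups_nonpos (i x : Int) (xs : List Int) (hx : ¬ x > 0) :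
    pvGroups i (x :: xs) = pvGroups (i + 1) xs := by
  rw [pvGroups.eq_def]
  simp only [hx, decide_false]
  match xs with
  | [] => simp [hx, pvGroups]
  | z :: zs =>
    by_cases hz : z > 0
    · simp [hx, hz]
    · rw [pvGroups.eq_def (idx := i + 1) (l := z :: zs)]
      simp only [hz, decide_false, List.takeWhile_cons, List.dropWhile_cons, hx,
        BEq.rfl, if_pos, List.length_cons]
      simp only [Bool.false_eq_true, if_false, List.nil_append]
      congr 1
      push_cast
      ring

-- pvGroups on a block of positives alone
theorem pvGroups_replicate (j : Int) (m : Nat) :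
    pvGroups j (List.replicate m 1) = if 0 < m then [(j, j + (m : Int))] else [] := by
  match m with
  | 0 => simp [pvGroups]
  | Nat.succ m' =>
    rw [List.replicate_succ, pvGroups.eq_def]
    norm_num [List.takeWhile_cons, List.takeWhile_replicate, List.dropWhile_cons,
      List.dropWhile_replicate, pvGroups]

-- a positive block followed by a non-positive element flushes as one span
theorem pvGroups_flush (j : Int) (m : Nat) (hm : 0 < m) (x : Int) (hx : ¬ x > 0) (xs : List Int) :
    pvGroups j (List.replicate m 1 ++ x :: xs) = (j, j + (m : Int)) :: pvGroups (j + (m : Int)) (x :: xs) := by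
  obtain ⟨m', rfl⟩ := Nat.exists_eq_succ_of_ne_zero (Nat.pos_iff_ne_zero.mp hm)
  rw [List.replicate_succ, List.cons_append, pvGroups.eq_def]
  have htw : (List.replicate m' (1:Int) ++ x :: xs).takeWhile (fun y => decide (y > 0) == decide ((1:Int) > 0))
      = List.replicate m' 1 := by
    rw [List.takeWhile_append]
    simp [hx]
  have hdw : (List.replicate m' (1:Int) ++ x :: xs).dropWhile (fun y => decide (y > 0) == decide ((1:Int) > 0))
      = x :: xs := by
    rw [List.dropWhile_append]
    simp [hx]
  simp only [List.takeWhile_cons, List.dropWhile_cons, BEq.rfl, if_pos, htw, hdw]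
  norm_num

-- the loop invariant: A's state (span_len, spans) after consuming a prefix equals
-- prepending span_len virtual positives before the remaining suffix for B
theorem pvMain : ∀ (l : List Int) (i sl : Int) (sp : List (Int × Int)), 0 ≤ sl →
    (let st := (PySem.List.enumerate l i).foldl pvStepA (sl, sp);
     if st.1 > 0 then st.2 ++ [(i + (l.length : Int) - st.1, i + (l.length : Int))] else st.2)
    = sp ++ pvGroups (i - sl) (List.replicate sl.toNat 1 ++ l) := by
  intro l
  induction l with
  | nil =>
    intro i sl sp hsl
    simp only [PySem.List.enumerate_nil, List.foldl_nil, List.length_nil, List.append_nil]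
    rw [pvGroups_replicate]
    by_cases h : sl > 0
    · have : (0:Nat) < sl.toNat := by omega
      simp only [h, if_pos, this]
      have : ((sl.toNat : Int)) = sl := by omega
      rw [this]; ring_nf
    · have h0 : sl = 0 := by omega
      simp [h0]
  | cons x xs ih =>
    intro i sl sp hsl
    simp only [PySem.List.enumerate_cons, List.foldl_cons]
    by_cases hx : x > 0
    · have hstep : pvStepA (sl, sp) (i, x) = (sl + 1, sp) := by simp [pvStepA, hx]
      rw [hstep]
      have := ih (i + 1) (sl + 1) sp (by omega)
      simp only at this
      have hlen : (i + 1) + (xs.length : Int) = i + ((x :: xs).length : Int) := by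
        simp [List.length_cons]; ring
      rw [hlen] at this
      rw [this]
      congr 1
      have harith : i + 1 - (sl + 1) = i - sl := by ring
      rw [harith]
      apply pvGroups_congr ((sl + 1).toNat + xs.length + sl.toNat + 1) _ _ _ (by simp; omega)
      have h1 : (sl + 1).toNat = sl.toNat + 1 := by omega
      simp [h1, hx, List.replicate_succ' , List.map_append, List.map_replicate]
    · by_cases hsl0 : sl > 0
      · have hstep : pvStepA (sl, sp) (i, x) = (0, sp ++ [(i - sl, i)]) := by
          simp [pvStepA, hx, hsl0]
        rw [hstep]
        have := ih (i + 1) 0 (sp ++ [(i - sl, i)]) (by omega)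
        simp only [Int.toNat_zero, List.replicate_zero, List.nil_append, Int.sub_zero] at this
        have hlen : (i + 1) + (xs.length : Int) = i + ((x :: xs).length : Int) := by
          simp [List.length_cons]; ring
        rw [hlen] at this
        rw [this, List.append_assoc]
        congr 1
        have hflush := pvGroups_flush (i - sl) sl.toNat (by omega) x hx xs
        have hc : ((sl.toNat : Int)) = sl := by omega
        rw [hc] at hflush
        have harith : i - sl + sl = i := by ring
        rw [harith] at hflush
        rw [hflush, pvGroups_nonpos i x xs hx]
        simp
      · have h0 : sl = 0 := by omega
        subst h0
        have hstep : pvStepA (0, sp) (i, x) = (0, sp) := by simp [pvStepA, hx]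
        rw [hstep]
        have := ih (i + 1) 0 sp (by omega)
        simp only [Int.toNat_zero, List.replicate_zero, List.nil_append, Int.sub_zero] at this
        have hlen : (i + 1) + (xs.length : Int) = i + ((x :: xs).length : Int) := by
          simp [List.length_cons]; ring
        rw [hlen] at this
        rw [this]
        congr 1
        simp only [Int.toNat_zero, List.replicate_zero, List.nil_append, Int.sub_zero]
        rw [pvGroups_nonpos i x xs hx]

-- ===== VERDICT (by name: the statement is the Claim_ definition above) =====
theorem get_consecutive_spans_spec : Claim_equal_get_consecutive_spans := by
  intro arr _
  unfold Spec_get_consecutive_spans get_consecutive_spans get_consecutive_spans_alt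
  have := pvMain arr 0 0 [] (by omega)
  simp only [Int.toNat_zero, List.replicate_zero, List.nil_append, Int.sub_zero,
    List.nil_append, zero_add] at this
  simpa using this
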